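-- pv_equiv track=rewrite | github.com/jialin666/APRCOIE_v1 | tool/tool_extracte_with_matrices.py | sub_triple
-- ===== SOURCE A (Python) =====
-- def sub_triple(triple_in_numberA, triple_in_numberB):
--     for i in range(3):
--         triple_in_numberA[i] = list(set(triple_in_numberA[i]))
--         triple_in_numberA[i].sort()
--         triple_in_numberB[i] = list(set(triple_in_numberB[i]))
--         triple_in_numberB[i].sort()
--     # 如果triple A是triple B的子triple，即A的arg1, rel, arg2均是B 的arg1, rel, arg2的子集，则返回True，
--     # 否则False
--     intersect_a_b_arg1 = [ind for ind in triple_in_numberA[0] if ind in triple_in_numberB[0]]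
--     intersect_a_b_arg1 = list(set(intersect_a_b_arg1))
--     intersect_a_b_arg1.sort()
--     if intersect_a_b_arg1 != triple_in_numberA[0]:
--         return False
--     intersect_a_b_rel = [ind for ind in triple_in_numberA[1] if ind in triple_in_numberB[1]]
--     intersect_a_b_rel = list(set(intersect_a_b_rel))
--     intersect_a_b_rel.sort()
--     if intersect_a_b_rel != triple_in_numberA[1]:
--         return False
--     intersect_a_b_arg2 = [ind for ind in triple_in_numberA[2] if ind in triple_in_numberB[2]]
--     intersect_a_b_arg2 = list(set(intersect_a_b_arg2))
--     intersect_a_b_arg2.sort()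
--     if intersect_a_b_arg2 != triple_in_numberA[2]:
--         return False
--     return True
-- ===== SOURCE B (Python) =====
-- def sub_triple(triple_in_numberA, triple_in_numberB):
--     # same observable in-place normalisation as the original
--     for i in range(3):
--         triple_in_numberA[i] = sorted(set(triple_in_numberA[i]))
--         triple_in_numberB[i] = sorted(set(triple_in_numberB[i]))
--     # two-pointer merge over the two sorted duplicate-free lists per component
--     for i in range(3):
--         bi = triple_in_numberB[i]
--         n = len(bi)
--         j = 0
--         for x in triple_in_numberA[i]:
--             while j < n and bi[j] < x:
--                 j += 1
--             if j >= n or bi[j] != x: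
--                 return False
--             j += 1
--     return True
-- ===== Notes on version B (the rewrite author's own statement) =====
-- stated objective: alternative
-- what changed: Replaces the per-component membership-scan plus intersection rebuild (list comprehension with 'in', then set+sort and a list comparison) by a single coordinated two-pointer sweep over the two already-sorted deduplicated lists; the in-place normalisation of both arguments is kept identical.
import Mathlib
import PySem

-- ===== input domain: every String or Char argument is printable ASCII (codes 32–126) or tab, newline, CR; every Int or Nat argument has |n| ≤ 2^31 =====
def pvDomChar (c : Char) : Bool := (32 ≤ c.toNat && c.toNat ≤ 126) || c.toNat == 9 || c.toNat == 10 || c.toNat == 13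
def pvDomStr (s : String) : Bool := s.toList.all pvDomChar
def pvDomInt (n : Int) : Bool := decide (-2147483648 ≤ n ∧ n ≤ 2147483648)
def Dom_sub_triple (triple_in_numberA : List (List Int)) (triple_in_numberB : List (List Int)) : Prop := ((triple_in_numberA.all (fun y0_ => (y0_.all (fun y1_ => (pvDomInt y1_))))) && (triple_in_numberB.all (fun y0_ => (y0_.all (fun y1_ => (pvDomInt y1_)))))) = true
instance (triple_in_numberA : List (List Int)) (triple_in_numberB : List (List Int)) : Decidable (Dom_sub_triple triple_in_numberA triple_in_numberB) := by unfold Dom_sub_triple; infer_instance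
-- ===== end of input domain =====

-- B replaces A's membership-scan + intersection rebuild per component by a two-pointer
-- merge over the two sorted deduplicated lists. Both Pythons mutate their arguments
-- in place identically (each component replaced by sorted(set(...))); the equivalence proved
-- here is about the RETURN value.

-- ===== PORT A =====
-- sorted(set(l)) — 'list(set(l)); .sort()' in A
def pvNorm (l : List Int) : List Int := PySem.List.sorted (PySem.Set.ofList l) (fun x => x)

def sub_triple (triple_in_numberA : List (List Int)) (triple_in_numberB : List (List Int)) : Bool :=
  let a0 := pvNorm (PySem.List.pyGetD triple_in_numberA 0 [])
  let a1 := pvNorm (PySem.List.pyGetD triple_in_numberA 1 [])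
  let a2 := pvNorm (PySem.List.pyGetD triple_in_numberA 2 [])
  let b0 := pvNorm (PySem.List.pyGetD triple_in_numberB 0 [])
  let b1 := pvNorm (PySem.List.pyGetD triple_in_numberB 1 [])
  let b2 := pvNorm (PySem.List.pyGetD triple_in_numberB 2 [])
  let intersect_a_b_arg1 := PySem.List.sorted (PySem.Set.ofList (a0.filter (fun ind => decide (ind ∈ b0)))) (fun x => x)
  if intersect_a_b_arg1 ≠ a0 then false
  else
    let intersect_a_b_rel := PySem.List.sorted (PySem.Set.ofList (a1.filter (fun ind => decide (ind ∈ b1)))) (fun x => x)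
    if intersect_a_b_rel ≠ a1 then false
    else
      let intersect_a_b_arg2 := PySem.List.sorted (PySem.Set.ofList (a2.filter (fun ind => decide (ind ∈ b2)))) (fun x => x)
      if intersect_a_b_arg2 ≠ a2 then false
      else true

-- ===== PORT B =====
-- the inner 'while bi[j] < x … then check bi[j] == x, advance' sweep of Source B
def pvMergeSub : List Int → List Int → Bool
  | [], _ => true
  | _ :: _, [] => false
  | x :: xs, y :: ys =>
      if y < x then pvMergeSub (x :: xs) ys
      else if y = x then pvMergeSub xs ys
      else false

def sub_triple_alt (triple_in_numberA : List (List Int)) (triple_in_numberB : List (List Int)) : Bool :=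
  let a0 := pvNorm (PySem.List.pyGetD triple_in_numberA 0 [])
  let a1 := pvNorm (PySem.List.pyGetD triple_in_numberA 1 [])
  let a2 := pvNorm (PySem.List.pyGetD triple_in_numberA 2 [])
  let b0 := pvNorm (PySem.List.pyGetD triple_in_numberB 0 [])
  let b1 := pvNorm (PySem.List.pyGetD triple_in_numberB 1 [])
  let b2 := pvNorm (PySem.List.pyGetD triple_in_numberB 2 [])
  pvMergeSub a0 b0 && pvMergeSub a1 b1 && pvMergeSub a2 b2

-- ===== PRECONDITION & SPEC =====
-- Pre_ excludes exactly the inputs where Python A raises IndexError: fewer than three components.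
def Pre_sub_triple (triple_in_numberA : List (List Int)) (triple_in_numberB : List (List Int)) : Prop :=
  3 ≤ triple_in_numberA.length ∧ 3 ≤ triple_in_numberB.length
instance (triple_in_numberA : List (List Int)) (triple_in_numberB : List (List Int)) : Decidable (Pre_sub_triple triple_in_numberA triple_in_numberB) := by unfold Pre_sub_triple; infer_instance

def pvWitness_sub_triple : List (List Int) × List (List Int) := ([[1, 2], [3], []], [[2, 1, 5], [3, 3], [4]])

def Spec_sub_triple (triple_in_numberA : List (List Int)) (triple_in_numberB : List (List Int)) (out : Bool) : Prop := out = sub_triple_alt triple_in_numberA triple_in_numberB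
instance (triple_in_numberA : List (List Int)) (triple_in_numberB : List (List Int)) (out : Bool) : Decidable (Spec_sub_triple triple_in_numberA triple_in_numberB out) := by unfold Spec_sub_triple; infer_instance

-- ===== CLAIM (what is proved, stated in full; the proofs are below) =====
def Claim_equal_sub_triple : Prop := ∀ (triple_in_numberA : List (List Int)) (triple_in_numberB : List (List Int)), Dom_sub_triple triple_in_numberA triple_in_numberB → Pre_sub_triple triple_in_numberA triple_in_numberB → Spec_sub_triple triple_in_numberA triple_in_numberB (sub_triple triple_in_numberA triple_in_numberB)

-- ===== LEMMAS AND PROOFS =====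

lemma pvMergeSub_cons (x y : Int) (xs ys : List Int) :
    pvMergeSub (x :: xs) (y :: ys)
      = if y < x then pvMergeSub (x :: xs) ys else if y = x then pvMergeSub xs ys else false := rfl

-- the two-pointer sweep on strictly sorted lists decides the subset relation
lemma pvMergeSub_iff (a b : List Int) (ha : a.Pairwise (· < ·)) (hb : b.Pairwise (· < ·)) :
    pvMergeSub a b = true ↔ ∀ x ∈ a, x ∈ b := by
  induction b generalizing a with
  | nil =>
    cases a with
    | nil => simp [pvMergeSub]
    | cons x xs =>
      have hf : pvMergeSub (x :: xs) [] = false := rfl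
      rw [hf]
      simp only [Bool.false_eq_true, false_iff]
      intro h
      simpa using h x List.mem_cons_self
  | cons y ys ih =>
    cases a with
    | nil => simp [pvMergeSub]
    | cons x xs =>
      have hys : ys.Pairwise (· < ·) := hb.of_cons
      have hyall : ∀ z ∈ ys, y < z := by
        intro z hz; exact List.rel_of_pairwise_cons hb hz
      have hxall : ∀ z ∈ xs, x < z := by
        intro z hz; exact List.rel_of_pairwise_cons ha hz
      rcases lt_trichotomy y x with hlt | heq | hgt
      · rw [pvMergeSub_cons, if_pos hlt]
        rw [ih (x :: xs) ha hys]
        constructor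
        · intro h z hz; exact List.mem_cons_of_mem _ (h z hz)
        · intro h z hz
          have hzy : y < z := by
            rcases List.mem_cons.1 hz with rfl | hzt
            · exact hlt
            · exact hlt.trans (hxall z hzt)
          rcases List.mem_cons.1 (h z hz) with rfl | hzys
          · exact absurd hzy (lt_irrefl z)
          · exact hzys
      · subst heq
        rw [pvMergeSub_cons, if_neg (lt_irrefl y), if_pos rfl]
        rw [ih xs ha.of_cons hys]
        constructor
        · intro h z hz
          rcases List.mem_cons.1 hz with rfl | hzt
          · exact List.mem_cons_self
          · exact List.mem_cons_of_mem _ (h z hzt)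
        · intro h z hz
          have hyz : y < z := hxall z hz
          rcases List.mem_cons.1 (h z (List.mem_cons_of_mem _ hz)) with rfl | hzys
          · exact absurd hyz (lt_irrefl z)
          · exact hzys
      · rw [pvMergeSub_cons, if_neg (not_lt.2 (le_of_lt hgt)), if_neg (ne_of_gt hgt)]
        simp only [Bool.false_eq_true, false_iff]
        intro h
        rcases List.mem_cons.1 (h x List.mem_cons_self) with heq | hxys
        · exact absurd heq (ne_of_lt hgt)
        · exact absurd hgt (not_lt.2 (le_of_lt (hyall x hxys)))

-- A's per-component test ('sorted deduplicated intersection equals the component') is the subset relation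
lemma pvCompA_iff (a b : List Int) (ha : a.Pairwise (· < ·)) :
    PySem.List.sorted (PySem.Set.ofList (a.filter (fun ind => decide (ind ∈ b)))) (fun x => x) = a
      ↔ ∀ x ∈ a, x ∈ b := by
  constructor
  · intro hs x hx
    have : x ∈ PySem.List.sorted (PySem.Set.ofList (a.filter (fun ind => decide (ind ∈ b)))) (fun x => x) := by
      rw [hs]; exact hx
    rw [PySem.List.mem_sorted, PySem.Set.mem_ofList, List.mem_filter] at this
    simpa using this.2
  · intro h
    have hf : a.filter (fun ind => decide (ind ∈ b)) = a :=
      List.filter_eq_self.2 (fun x hx => by simpa using h x hx)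
    rw [hf]
    have hnd : a.Nodup := ha.imp (fun hlt => ne_of_lt hlt)
    have hperm : a.Perm (PySem.Set.ofList a) := by
      rw [List.perm_ext_iff_of_nodup hnd (PySem.Set.nodup_ofList a)]
      intro z; rw [PySem.Set.mem_ofList]
    exact PySem.List.sorted_eq_of_perm_of_pairwise_lt (PySem.Set.ofList a) a (fun x => x) hperm ha

lemma pvNorm_pairwise (l : List Int) : (pvNorm l).Pairwise (· < ·) :=
  PySem.List.sorted_ofList_pairwise_lt l

-- ===== VERDICT (by name: the statement is the Claim_ definition above) =====
theorem sub_triple_spec : Claim_equal_sub_triple := by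
  intro A B _ _
  show sub_triple A B = sub_triple_alt A B
  simp only [sub_triple, sub_triple_alt]
  have h0 := (pvCompA_iff (pvNorm (PySem.List.pyGetD A 0 [])) (pvNorm (PySem.List.pyGetD B 0 []))
      (pvNorm_pairwise _)).trans
    (pvMergeSub_iff _ _ (pvNorm_pairwise _) (pvNorm_pairwise _)).symm
  have h1 := (pvCompA_iff (pvNorm (PySem.List.pyGetD A 1 [])) (pvNorm (PySem.List.pyGetD B 1 []))
      (pvNorm_pairwise _)).trans
    (pvMergeSub_iff _ _ (pvNorm_pairwise _) (pvNorm_pairwise _)).symm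
  have h2 := (pvCompA_iff (pvNorm (PySem.List.pyGetD A 2 [])) (pvNorm (PySem.List.pyGetD B 2 []))
      (pvNorm_pairwise _)).trans
    (pvMergeSub_iff _ _ (pvNorm_pairwise _) (pvNorm_pairwise _)).symm
  simp only [ne_eq, h0, h1, h2]
  by_cases H0 : pvMergeSub (pvNorm (PySem.List.pyGetD A 0 [])) (pvNorm (PySem.List.pyGetD B 0 [])) = true <;>
  by_cases H1 : pvMergeSub (pvNorm (PySem.List.pyGetD A 1 [])) (pvNorm (PySem.List.pyGetD B 1 [])) = true <;>
  by_cases H2 : pvMergeSub (pvNorm (PySem.List.pyGetD A 2 [])) (pvNorm (PySem.List.pyGetD B 2 [])) = true <;>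
  simp [H0, H1, H2]
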